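-- pv_equiv track=rewrite | github.com/xiasong0501/seedance_prompt | scripts/generate_seedance_prompts.py | infer_state_value_from_patterns
-- ===== SOURCE A (Python) =====
-- from typing import Any, Collection, Mapping, Sequence
--
-- def infer_state_value_from_patterns(text: str, patterns: Sequence[tuple[str, str]]) -> str:
--     normalized = str(text or "")
--     best_index = -1
--     best_value = ""
--     for needle, value in patterns:
--         position = normalized.rfind(needle)
--         if position >= best_index and position >= 0:
--             best_index = position
--             best_value = value
--     return best_value
-- ===== SOURCE B (Python) =====
-- def infer_state_value_from_patterns(text, patterns):
--     # Single reverse sweep over start positions: the first (rightmost) position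
--     # where any needle matches decides; the last matching pattern there wins.
--     normalized = str(text or "")
--     for i in range(len(normalized), -1, -1):
--         result = None
--         for needle, value in patterns:
--             if normalized.startswith(needle, i):
--                 result = value
--         if result is not None:
--             return result
--     return ""
-- ===== Notes on version B (the rewrite author's own statement) =====
-- stated objective: alternative
-- what changed: Instead of calling rfind per pattern and keeping a running best, B makes one reverse sweep over text start positions and returns at the first (rightmost) position where any needle matches, picking the last matching pattern there.
import Mathlib
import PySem

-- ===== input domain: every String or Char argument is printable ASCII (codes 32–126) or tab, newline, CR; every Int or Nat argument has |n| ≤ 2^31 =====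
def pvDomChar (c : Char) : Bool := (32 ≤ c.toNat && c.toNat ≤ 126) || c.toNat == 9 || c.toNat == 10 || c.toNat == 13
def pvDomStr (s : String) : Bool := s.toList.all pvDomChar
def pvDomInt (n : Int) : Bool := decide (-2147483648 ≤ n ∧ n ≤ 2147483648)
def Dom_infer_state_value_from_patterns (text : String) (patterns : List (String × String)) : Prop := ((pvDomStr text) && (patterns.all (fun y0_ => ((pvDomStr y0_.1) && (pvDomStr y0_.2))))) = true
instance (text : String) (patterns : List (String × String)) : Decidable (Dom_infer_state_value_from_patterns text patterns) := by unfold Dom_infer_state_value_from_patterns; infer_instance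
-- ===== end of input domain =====

-- B replaces the per-pattern rfind loop by a single reverse sweep over start positions
-- (same value everywhere; not measurably faster in general — objective: alternative).

-- ===== PORT A =====
def infer_state_value_from_patterns (text : String) (patterns : List (String × String)) : String :=
  let normalized := text  -- str(text or "") is text itself for a str argument
  let st := patterns.foldl
    (fun (acc : Int × String) (p : String × String) =>
      let position := PySem.Str.rfind normalized p.1
      if position ≥ acc.1 ∧ position ≥ 0 then (position, p.2) else acc)
    (-1, "")
  st.2

-- ===== PORT B =====
-- inner loop of Source B: last pattern whose needle matches at start position i;
-- normalized.startswith(needle, i) is ported as startswith on (drop i) — exact for 0 ≤ i ≤ len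
def pvInner (tl : List Char) (patterns : List (String × String)) (i : Nat) : Option String :=
  patterns.foldl
    (fun acc p => if PySem.Chars.startswith (tl.drop i) p.1.toList then some p.2 else acc) none

-- outer loop of Source B: i from len(text) down to 0, return at the first position with a match
def pvScan (tl : List Char) (patterns : List (String × String)) : Nat → String
  | 0 => match pvInner tl patterns 0 with
    | some v => v
    | none => ""
  | i+1 => match pvInner tl patterns (i+1) with
    | some v => v
    | none => pvScan tl patterns i

def infer_state_value_from_patterns_alt (text : String) (patterns : List (String × String)) : String :=
  pvScan text.toList patterns text.toList.length

-- ===== PRECONDITION & SPEC =====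
def Spec_infer_state_value_from_patterns (text : String) (patterns : List (String × String)) (out : String) : Prop := out = infer_state_value_from_patterns_alt text patterns
instance (text : String) (patterns : List (String × String)) (out : String) : Decidable (Spec_infer_state_value_from_patterns text patterns out) := by unfold Spec_infer_state_value_from_patterns; infer_instance

-- ===== CLAIM (what is proved, stated in full; the proofs are below) =====
def Claim_equal_infer_state_value_from_patterns : Prop := ∀ (text : String) (patterns : List (String × String)), Dom_infer_state_value_from_patterns text patterns → Spec_infer_state_value_from_patterns text patterns (infer_state_value_from_patterns text patterns)

-- ===== LEMMAS AND PROOFS =====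

-- A's loop body, parametrized by the per-needle score function
def pvStep (g : String → Int) (acc : Int × String) (p : String × String) : Int × String :=
  if g p.1 ≥ acc.1 ∧ g p.1 ≥ 0 then (g p.1, p.2) else acc

lemma pvGo_zero (s sub : List Char) :
    PySem.Chars.rfind.go s sub 0 = if sub.isPrefixOf s then 0 else -1 := rfl

lemma pvGo_succ (s sub : List Char) (j : Nat) :
    PySem.Chars.rfind.go s sub (j+1) =
      if sub.isPrefixOf (s.drop (j+1)) then ((j:Int)+1) else PySem.Chars.rfind.go s sub j := by
  conv_lhs => rw [PySem.Chars.rfind.go]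
  norm_num

lemma pvGo_le (s sub : List Char) (i : Nat) : PySem.Chars.rfind.go s sub i ≤ (i : Int) := by
  induction i with
  | zero => rw [pvGo_zero]; split_ifs <;> omega
  | succ i ih => rw [pvGo_succ]; split_ifs <;> push_cast <;> omega

lemma pvFoldlCongr {α β : Type} (f f' : β → α → β) (ps : List α) (init : β)
    (h : ∀ p ∈ ps, ∀ acc, f acc p = f' acc p) :
    ps.foldl f init = ps.foldl f' init := by
  induction ps generalizing init with
  | nil => rfl
  | cons p ps ih =>
      simp only [List.foldl_cons, h p (by simp)]
      exact ih _ (fun q hq => h q (List.mem_cons_of_mem p hq))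

lemma pvInnerShift (b : String × String → Bool) (ps : List (String × String)) (a : Option String) :
    ps.foldl (fun acc p => if b p then some p.2 else acc) a =
      match ps.foldl (fun acc p => if b p then some p.2 else acc) none with
      | some v => some v
      | none => a := by
  induction ps generalizing a with
  | nil => rfl
  | cons p ps ih =>
      simp only [List.foldl_cons]
      rw [ih, ih (if b p then some p.2 else none)]
      cases h : ps.foldl (fun acc p => if b p then some p.2 else acc) none <;> by_cases hb : b p <;> simp [hb]

lemma pvInnerNone (b : String × String → Bool) (ps : List (String × String))
    (h : ps.foldl (fun acc p => if b p then some p.2 else acc) none = none) :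
    ∀ p ∈ ps, b p = false := by
  induction ps with
  | nil => simp
  | cons p ps ih =>
      intro q hq
      rw [List.foldl_cons, pvInnerShift] at h
      rcases hfold : ps.foldl (fun acc p => if b p then some p.2 else acc) none with _ | v
      · rw [hfold] at h
        simp only at h
        by_cases hb : b p
        · simp [hb] at h
        · rcases List.mem_cons.1 hq with rfl | hq'
          · exact eq_false_of_ne_true hb
          · exact ih hfold q hq'
      · rw [hfold] at h; simp at h

lemma pvStepKeep (g : String → Int) (M : Int) (v : String) (ps : List (String × String))
    (hg : ∀ p ∈ ps, g p.1 ≤ M) (hne : ∀ p ∈ ps, g p.1 ≠ M) :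
    ps.foldl (pvStep g) (M, v) = (M, v) := by
  induction ps with
  | nil => rfl
  | cons p ps ih =>
      have h1 := hg p (by simp)
      have h2 := hne p (by simp)
      have : pvStep g (M, v) p = (M, v) := by
        unfold pvStep
        rw [if_neg]
        rintro ⟨ha, _⟩
        exact h2 (le_antisymm h1 ha)
      rw [List.foldl_cons, this]
      exact ih (fun q hq => hg q (by simp [hq])) (fun q hq => hne q (by simp [hq]))

lemma pvFoldNeg (g : String → Int) (x : String) (ps : List (String × String))
    (h : ∀ p ∈ ps, g p.1 = -1) :
    ps.foldl (pvStep g) (-1, x) = (-1, x) := by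
  induction ps with
  | nil => rfl
  | cons p ps ih =>
      have h1 := h p (by simp)
      have : pvStep g (-1, x) p = (-1, x) := by
        unfold pvStep; rw [if_neg]; rintro ⟨_, hb⟩; rw [h1] at hb; omega
      rw [List.foldl_cons, this]
      exact ih (fun q hq => h q (by simp [hq]))

lemma pvKey (g : String → Int) (b : String × String → Bool) (M : Int) (hM : 0 ≤ M)
    (ps : List (String × String)) (v : String)
    (hg : ∀ p ∈ ps, g p.1 ≤ M)
    (hb : ∀ p ∈ ps, (b p = true ↔ g p.1 = M)) :
    ∀ (init : Int × String), init.1 ≤ M →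
    ps.foldl (fun acc p => if b p then some p.2 else acc) none = some v →
    ps.foldl (pvStep g) init = (M, v) := by
  induction ps with
  | nil => intro init _ h; simp at h
  | cons p ps ih =>
      intro init hinit hsome
      rw [List.foldl_cons, pvInnerShift] at hsome
      rw [List.foldl_cons]
      by_cases hbp : b p
      · have hgp : g p.1 = M := (hb p (by simp)).1 hbp
        have hstep : pvStep g init p = (M, p.2) := by
          unfold pvStep; rw [if_pos ⟨by omega, by omega⟩, hgp]
        rw [hstep]
        rcases hfold : ps.foldl (fun acc p => if b p then some p.2 else acc) none with _ | v'
        · rw [hfold] at hsome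
          simp only [hbp, if_pos] at hsome
          have hne : ∀ q ∈ ps, g q.1 ≠ M := by
            intro q hq hqe
            have := pvInnerNone b ps hfold q hq
            rw [(hb q (by simp [hq])).2 hqe] at this
            simp at this
          have := pvStepKeep g M p.2 ps (fun q hq => hg q (by simp [hq])) hne
          rw [this]
          simp at hsome; rw [hsome]
        · rw [hfold] at hsome; simp only at hsome
          have hv : v' = v := by simpa using hsome
          subst hv
          exact ih (fun q hq => hg q (by simp [hq])) (fun q hq => hb q (by simp [hq])) (M, p.2) le_rfl hfold
      · have hstep : (pvStep g init p).1 ≤ M := by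
          unfold pvStep; split_ifs with h
          · exact hg p (by simp)
          · exact hinit
        rcases hfold : ps.foldl (fun acc p => if b p then some p.2 else acc) none with _ | v'
        · rw [hfold] at hsome; simp [hbp] at hsome
        · rw [hfold] at hsome; simp only at hsome
          have hv : v' = v := by simpa using hsome
          subst hv
          exact ih (fun q hq => hg q (by simp [hq])) (fun q hq => hb q (by simp [hq])) _ hstep hfold

lemma pvStartswith_iff (s p : List Char) : PySem.Chars.startswith s p = true ↔ p.isPrefixOf s = true := by
  rw [PySem.Chars.startswith_iff, List.isPrefixOf_iff_prefix]

lemma pvScan_eq (tl : List Char) (ps : List (String × String)) (i : Nat) :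
    pvScan tl ps i =
      (ps.foldl (pvStep (fun n => PySem.Chars.rfind.go tl n.toList i)) (-1, "")).2 := by
  induction i with
  | zero =>
      rcases h : pvInner tl ps 0 with _ | v
      · have hall := pvInnerNone _ ps h
        have : ∀ p ∈ ps, PySem.Chars.rfind.go tl p.1.toList 0 = -1 := by
          intro p hp
          rw [pvGo_zero]
          have := hall p hp
          rw [if_neg]
          intro hpre
          rw [Bool.eq_false_iff] at this
          exact this ((pvStartswith_iff _ _).2 (by simpa using hpre))
        rw [pvFoldNeg _ _ _ this]
        simp [pvScan, h]
      · have := pvKey (fun n => PySem.Chars.rfind.go tl n.toList 0)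
          (fun p => PySem.Chars.startswith (tl.drop 0) p.1.toList) 0 le_rfl ps v
          (fun p _ => by
            show PySem.Chars.rfind.go tl p.1.toList 0 ≤ 0
            rw [pvGo_zero]; split_ifs <;> omega)
          (fun p _ => by
            show PySem.Chars.startswith (tl.drop 0) p.1.toList = true ↔ PySem.Chars.rfind.go tl p.1.toList 0 = 0
            rw [pvGo_zero]
            constructor
            · intro hb
              have hpre : p.1.toList.isPrefixOf tl = true := by
                simpa using (pvStartswith_iff _ _).1 hb
              rw [if_pos hpre]
            · intro he
              by_cases hpre : p.1.toList.isPrefixOf tl = true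
              · exact (pvStartswith_iff _ _).2 (by simpa using hpre)
              · rw [if_neg hpre] at he; omega)
          (-1, "") (by omega) h
        rw [this]
        simp [pvScan, h]
  | succ i ih =>
      rcases h : pvInner tl ps (i+1) with _ | v
      · have hall := pvInnerNone _ ps h
        have heq : ∀ p ∈ ps, ∀ acc,
            pvStep (fun n => PySem.Chars.rfind.go tl n.toList (i+1)) acc p =
            pvStep (fun n => PySem.Chars.rfind.go tl n.toList i) acc p := by
          intro p hp acc
          have hb := hall p hp
          have : PySem.Chars.rfind.go tl p.1.toList (i+1) = PySem.Chars.rfind.go tl p.1.toList i := by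
            rw [pvGo_succ, if_neg]
            intro hpre
            rw [Bool.eq_false_iff] at hb
            exact hb ((pvStartswith_iff _ _).2 hpre)
          simp [pvStep, this]
        rw [pvFoldlCongr _ _ _ _ heq]
        simp only [pvScan, h]
        exact ih
      · have := pvKey (fun n => PySem.Chars.rfind.go tl n.toList (i+1))
          (fun p => PySem.Chars.startswith (tl.drop (i+1)) p.1.toList) ((i:Int)+1) (by omega) ps v
          (fun p _ => by
            show PySem.Chars.rfind.go tl p.1.toList (i+1) ≤ ((i:Int)+1)
            have := pvGo_le tl p.1.toList (i+1); push_cast at this ⊢; omega)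
          (fun p _ => by
            show PySem.Chars.startswith (tl.drop (i+1)) p.1.toList = true ↔ PySem.Chars.rfind.go tl p.1.toList (i+1) = ((i:Int)+1)
            constructor
            · intro hb
              rw [pvGo_succ, if_pos ((pvStartswith_iff _ _).1 hb)]
            · intro he
              rw [pvGo_succ] at he
              split_ifs at he with hpre
              · exact (pvStartswith_iff _ _).2 hpre
              · have := pvGo_le tl p.1.toList i
                omega)
          (-1, "") (by omega) h
        rw [this]
        simp [pvScan, h]

-- ===== VERDICT (by name: the statement is the Claim_ definition above) =====
theorem infer_state_value_from_patterns_spec : Claim_equal_infer_state_value_from_patterns := by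
  intro text patterns _
  unfold Spec_infer_state_value_from_patterns
  unfold infer_state_value_from_patterns infer_state_value_from_patterns_alt
  rw [pvScan_eq]
  congr 1
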